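-- pv_equiv track=rewrite | github.com/green-elaia/problem-solving | 불량사용자.py | solution
-- ===== SOURCE A (Python) =====
-- def solution(user_id, banned_id):
--     # 길이가 매우 짧으니까 O(n^3)도 괜춘
--     sanction = []   # 제재아이디
--     for b_id in banned_id:
--         tmp = []
--         for u_id in user_id:
--             if len(b_id) == len(u_id):
--                 for i in range(len(b_id)):
--                     if b_id[i] != '*' and b_id[i] != u_id[i]:
--                         break
--                 else:
--                     tmp.append(u_id)
--         sanction.append(tmp)
--
--     from itertools import product
--     id_combination = list(product(*sanction))
--     answer = len(id_combination)
--     for x in id_combination: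
--         if len(set(x)) != len(banned_id):
--             answer -= 1
--
--     from math import factorial
--     d = {}
--     for x in banned_id:
--         d[x] = d.get(x, 0) + 1
--     for x in d:
--         if d[x] > 1:
--             answer = answer // factorial(d[x])
--
--     return answer
-- ===== SOURCE B (Python) =====
-- def solution(user_id, banned_id):
--     # B: (1) index the users once — exact (star-free) patterns are answered by a
--     # counts dict, starred patterns scan only the bucket of users of their length;
--     # (2) count valid assignments level by level with a frontier of used-sets,
--     # pruning duplicate users early instead of materializing the full Cartesian
--     # product and filtering it afterwards.
--     counts = {}
--     by_len = {}
--     for u in user_id: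
--         counts[u] = counts.get(u, 0) + 1
--         by_len.setdefault(len(u), []).append(u)
--
--     cand = []
--     for b in banned_id:
--         if '*' in b:
--             cand.append([u for u in by_len.get(len(b), [])
--                          if all(bc == '*' or bc == uc for bc, uc in zip(b, u))])
--         else:
--             cand.append([b] * counts.get(b, 0))
--
--     partials = [frozenset()]
--     for c in cand:
--         partials = [p | {u} for p in partials for u in c if u not in p]
--     answer = len(partials)
--
--     from math import factorial
--     seen = set()
--     for b in banned_id:
--         if b not in seen:
--             seen.add(b)
--             cnt = banned_id.count(b)
--             if cnt > 1:
--                 answer //= factorial(cnt)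
--     return answer
-- ===== Notes on version B (the rewrite author's own statement) =====
-- stated objective: faster
-- what changed: B indexes the users once (a counts dict answers star-free patterns in O(1), length buckets restrict the scan for starred ones) and counts valid assignments level by level with a frontier of used-sets that prunes duplicate users early, instead of A's full user scan per pattern and a materialized Cartesian product filtered afterwards.
import Mathlib
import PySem

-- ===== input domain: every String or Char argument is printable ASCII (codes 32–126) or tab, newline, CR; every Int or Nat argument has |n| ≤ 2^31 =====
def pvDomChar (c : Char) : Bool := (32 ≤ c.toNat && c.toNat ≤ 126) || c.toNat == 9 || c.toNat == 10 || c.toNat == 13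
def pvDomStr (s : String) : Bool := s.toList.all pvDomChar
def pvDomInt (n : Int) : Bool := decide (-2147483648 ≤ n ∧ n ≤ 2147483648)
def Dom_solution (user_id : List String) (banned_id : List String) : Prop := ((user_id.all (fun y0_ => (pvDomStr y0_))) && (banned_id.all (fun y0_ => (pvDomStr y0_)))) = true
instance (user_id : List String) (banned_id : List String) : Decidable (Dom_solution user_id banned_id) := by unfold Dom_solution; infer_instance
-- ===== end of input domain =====

-- B indexes the users once (counts dict for star-free patterns, length buckets for
-- starred ones) and counts valid assignments level by level with a pruned frontier of
-- used-sets, instead of A's full user scan per pattern and materialized Cartesian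
-- product filtered afterwards (objective: faster, measured).

-- ===== PORT A =====

-- math.factorial (argument here is always a nonnegative count)
def pvFact (n : Int) : Int := (Nat.factorial n.toNat : Int)

-- inner character loop of A: 'for i in range(len(b)): if b[i] != '*' and b[i] != u[i]: break / else: match'
-- (only called when len(b) == len(u); the length-mismatch branch is unreachable)
def pvMatchA : List Char → List Char → Bool
  | [], _ => true
  | _ :: _, [] => true      -- unreachable: A guards len(b) == len(u) before the loop
  | bc :: bs, uc :: us => if bc ≠ '*' ∧ bc ≠ uc then false else pvMatchA bs us

-- itertools.product(*sanction), as lists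
def pvProd : List (List String) → List (List String)
  | [] => [[]]
  | l :: ls => l.flatMap (fun x => (pvProd ls).map (fun t => x :: t))

def solution (user_id : List String) (banned_id : List String) : Int :=
  let sanction : List (List String) :=
    banned_id.foldl (fun acc b_id =>
      acc ++ [user_id.foldl (fun tmp u_id =>
        if PySem.Str.len b_id == PySem.Str.len u_id then
          (if pvMatchA b_id.toList u_id.toList then tmp ++ [u_id] else tmp)
        else tmp) []]) []
  let idComb := pvProd sanction
  let answer : Int := (idComb.length : Int)
  let answer := idComb.foldl (fun a x =>
    if (PySem.Set.ofList x).length ≠ banned_id.length then a - 1 else a) answer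
  let d : PySem.Dict String Int :=
    banned_id.foldl (fun d x => d.insert x (d.getD x 0 + 1)) PySem.Dict.empty
  d.keys.foldl (fun a x =>
    if d.getD x 0 > 1 then PySem.Int.floordiv a (pvFact (d.getD x 0)) else a) answer

-- ===== PORT B =====

def solution_alt (user_id : List String) (banned_id : List String) : Int :=
  -- one pass over user_id builds both indices: exact-string counts and length buckets
  let st := user_id.foldl
    (fun (st : PySem.Dict String Int × PySem.Dict Int (List String)) u =>
      (st.1.insert u (st.1.getD u 0 + 1),
       st.2.insert (PySem.Str.len u) (st.2.getD (PySem.Str.len u) [] ++ [u])))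
    (PySem.Dict.empty, PySem.Dict.empty)
  let counts := st.1
  let byLen := st.2
  let cand : List (List String) := banned_id.map (fun b =>
    if PySem.Str.isIn "*" b then
      (byLen.getD (PySem.Str.len b) []).filter (fun u =>
        (b.toList.zip u.toList).all (fun p => p.1 == '*' || p.1 == p.2))
    else PySem.List.pyRepeat [b] (counts.getD b 0))  -- [b] * counts.get(b, 0)
  -- frontier of partial assignments (sets of used ids), one level per pattern
  let partials := cand.foldl
    (fun parts c => parts.flatMap (fun p =>
      (c.filter (fun u => !p.contains u)).map (fun u => p.add u)))
    [PySem.Set.empty]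
  let answer : Int := (partials.length : Int)
  -- Source B's 'seen'-set first-occurrence loop is the ordered dedup (PySem.List.dedup)
  (PySem.List.dedup banned_id).foldl (fun a b =>
    let c : Int := (banned_id.count b : Int)
    if c > 1 then PySem.Int.floordiv a (pvFact c) else a) answer

-- ===== PRECONDITION & SPEC =====
def Spec_solution (user_id : List String) (banned_id : List String) (out : Int) : Prop := out = solution_alt user_id banned_id
instance (user_id : List String) (banned_id : List String) (out : Int) : Decidable (Spec_solution user_id banned_id out) := by unfold Spec_solution; infer_instance

-- ===== CLAIM (what is proved, stated in full; the proofs are below) =====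
def Claim_equal_solution : Prop := ∀ (user_id : List String) (banned_id : List String), Dom_solution user_id banned_id → Spec_solution user_id banned_id (solution user_id banned_id)

-- ===== LEMMAS AND PROOFS =====

-- B's matcher as one predicate (proof-side bridge between the two ports)
def pvMatchB (b u : List Char) : Bool :=
  b.length == u.length && (b.zip u).all (fun p => p.1 == '*' || p.1 == p.2)

-- DFS count of valid assignments: proof-side bridge between A's filtered product
-- and B's level-by-level frontier
def pvCount : List (List String) → PySem.Set String → Int
  | [], _ => 1
  | c :: cs, used =>
    c.foldl (fun t u => if used.contains u then t else t + pvCount cs (used.add u)) 0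

-- Bool predicate "x is a valid assignment w.r.t. the already-used set"
def pvQ (used : PySem.Set String) (x : List String) : Bool :=
  decide x.Nodup && x.all (fun u => !used.contains u)

-- the two matchers agree (A's length guard folded in)
theorem pv_match_eq (b u : List Char) :
    ((b.length == u.length) && pvMatchA b u) = pvMatchB b u := by
  induction b generalizing u with
  | nil => cases u <;> simp [pvMatchA, pvMatchB]
  | cons bc bs ih =>
    cases u with
    | nil => simp [pvMatchA, pvMatchB]
    | cons uc us =>
      simp only [pvMatchA, pvMatchB, List.zip_cons_cons, List.all_cons, List.length_cons]
      by_cases h : bc ≠ '*' ∧ bc ≠ uc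
      · rw [if_pos h]
        rcases h with ⟨h1, h2⟩
        simp [h1, h2]
      · rw [if_neg h]
        have hb : (bc == '*' || bc == uc) = true := by
          by_cases hs : bc = '*'
          · simp [hs]
          · push Not at h
            simp [h hs]
        rw [show (bs.length + 1 == us.length + 1) = (bs.length == us.length) from by simp,
           hb, Bool.true_and]
        simpa [pvMatchB] using ih us

-- every tuple of the product has one entry per pattern list
theorem pv_prod_length {ls : List (List String)} {x : List String}
    (hx : x ∈ pvProd ls) : x.length = ls.length := by
  induction ls generalizing x with
  | nil => simp [pvProd] at hx; simp [hx]
  | cons l ls ih =>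
    simp [pvProd] at hx
    obtain ⟨a, _, t, ht, rfl⟩ := hx
    simp [ih ht]

-- A's subtracting pass over the product
theorem pv_foldl_sub (L : List (List String)) (bad : List String → Prop)
    [DecidablePred bad] (init : Int) :
    L.foldl (fun a x => if bad x then a - 1 else a) init
      = init - (L.countP (fun x => decide (bad x)) : Int) := by
  induction L generalizing init with
  | nil => simp
  | cons y L ih =>
    simp only [List.foldl_cons, List.countP_cons, ih]
    by_cases h : bad y <;> simp [h] <;> push_cast <;> ring

theorem pv_countP_split {α : Type} (l : List α) (p : α → Bool) :
    l.length = l.countP p + l.countP (fun a => !p a) := by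
  induction l with
  | nil => simp
  | cons y l ih =>
    by_cases h : p y = true <;> simp only [List.countP_cons, List.length_cons, ih, h] <;>
      simp <;> omega

-- set(x) has as many elements as x iff x has no duplicates
theorem pv_setlen_iff (x : List String) :
    (PySem.Set.ofList x).length = x.length ↔ x.Nodup := by
  have hn := PySem.Set.nodup_ofList x
  have hcard : (PySem.Set.ofList x).toFinset = x.toFinset := by
    ext a; simp [List.mem_toFinset, PySem.Set.mem_ofList]
  have h1 : (PySem.Set.ofList x).toFinset.card = (PySem.Set.ofList x).length :=
    List.toFinset_card_of_nodup hn
  have h3 : x.toFinset.card = x.dedup.length := List.card_toFinset x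
  have h4 : x.dedup.Sublist x := List.dedup_sublist x
  constructor
  · intro h
    have h2 : x.dedup.length = x.length := by rw [← h3, ← hcard, h1, h]
    have : x.dedup = x := h4.eq_of_length h2
    rw [← this]; exact x.nodup_dedup
  · intro h
    have : x.dedup = x := List.dedup_eq_self.mpr h
    rw [← h1, hcard, h3, this]

theorem pv_countP_flatMap (L : List String) (P : List String → Bool) (ls : List (List String)) :
    (L.flatMap (fun u => ls.map (fun t => u :: t))).countP P
      = (L.map (fun u => ls.countP (fun t => P (u :: t)))).sum := by
  rw [List.countP_flatMap]
  exact congrArg List.sum (List.map_congr_left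
    (fun u _ => by simp only [Function.comp_apply, List.countP_map]; rfl))

theorem pv_Q_true_iff (used : PySem.Set String) (x : List String) :
    pvQ used x = true ↔ (x.Nodup ∧ ∀ v ∈ x, v ∉ used) := by
  simp [pvQ, PySem.Set.contains]

theorem pv_Q_cons (used : PySem.Set String) (u : String) (x : List String) :
    pvQ used (u :: x) = (!used.contains u && pvQ (used.add u) x) := by
  rw [Bool.eq_iff_iff]
  simp [pv_Q_true_iff, PySem.Set.contains, PySem.Set.mem_add, List.nodup_cons]
  constructor
  · rintro ⟨⟨hux, hx⟩, hu, hall⟩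
    exact ⟨hu, hx, fun v hv => ⟨fun h => hall v hv h, fun h => hux (h ▸ hv)⟩⟩
  · rintro ⟨hu, hx, hall⟩
    exact ⟨⟨fun hux => (hall u hux).2 rfl, hx⟩, hu, fun v hv => (hall v hv).1⟩

-- the DFS count equals the number of tuples of the product that are valid
theorem pv_count_spec (ls : List (List String)) (used : PySem.Set String) :
    pvCount ls used = ((pvProd ls).countP (pvQ used) : Int) := by
  induction ls generalizing used with
  | nil => simp [pvCount, pvProd, pvQ]
  | cons c cs ih =>
    have hfun : (fun (t : Int) u => if used.contains u then t else t + pvCount cs (used.add u))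
        = (fun t u => t + (if used.contains u then 0 else pvCount cs (used.add u))) := by
      funext t u
      by_cases h : u ∈ used <;> simp [PySem.Set.contains, h]
    simp only [pvCount, pvProd, hfun, PySem.List.foldl_add, zero_add, pv_countP_flatMap]
    rw [Nat.cast_list_sum, List.map_map]
    refine congrArg List.sum (List.map_congr_left (fun u _ => ?_))
    simp only [Function.comp_apply]
    by_cases h : u ∈ used
    · have hc : used.contains u = true := by simp [PySem.Set.contains, h]
      have : (fun t => pvQ used (u :: t)) = fun _ => false := by
        funext t; rw [pv_Q_cons, hc]; simp
      rw [this]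
      simp [PySem.Set.contains, h]
    · have hc : used.contains u = false := by simp [PySem.Set.contains, h]
      have : (fun t => pvQ used (u :: t)) = pvQ (used.add u) := by
        funext t; rw [pv_Q_cons, hc]; simp
      rw [this]
      simp [PySem.Set.contains, h, ih]

-- the counting dict built over xs is lookup-equal to xs.count
theorem pv_dict_count (xs : List String) (d : PySem.Dict String Int) (k : String) :
    (xs.foldl (fun d x => d.insert x (d.getD x 0 + 1)) d).getD k 0
      = d.getD k 0 + (xs.count k : Int) := by
  induction xs generalizing d with
  | nil => simp
  | cons y xs ih =>
    simp only [List.foldl_cons, ih, PySem.Dict.getD_insert, List.count_cons]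
    by_cases h : k = y
    · simp [h]; ring
    · simp [h, Ne.symm h]

-- the length-bucket dict holds exactly the users of each length, in order
theorem pv_bylen (xs : List String) (d : PySem.Dict Int (List String)) (k : Int) :
    (xs.foldl (fun d u => d.insert (PySem.Str.len u) (d.getD (PySem.Str.len u) [] ++ [u])) d).getD k []
      = d.getD k [] ++ xs.filter (fun u => PySem.Str.len u == k) := by
  induction xs generalizing d with
  | nil => simp
  | cons y xs ih =>
    simp only [List.foldl_cons, ih, PySem.Dict.getD_insert, List.filter_cons]
    by_cases h : k = PySem.Str.len y
    · simp [h]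
    · have h' : ¬ k = (y.length : Int) := by simpa [PySem.Str.len_eq] using h
      have h2 : (((y.length : Int)) == k) = false := by
        rw [beq_eq_false_iff_ne]
        exact fun he => h' he.symm
      simp [PySem.Str.len_eq, h', h2]

-- a self-zip trivially satisfies the character test
theorem pv_zip_self_all (l : List Char) :
    ((l.zip l).all (fun p => p.1 == '*' || p.1 == p.2)) = true := by
  induction l with
  | nil => simp
  | cons c t iht => simp [iht]

-- with no star and equal lengths, pointwise-matching strings are equal
theorem pv_nostar_aux (b : List Char) : ∀ u, '*' ∉ b → b.length = u.length →
    ((b.zip u).all (fun p => p.1 == '*' || p.1 == p.2)) = true → u = b := by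
  induction b with
  | nil =>
    intro u _ hlen _
    cases u with
    | nil => rfl
    | cons _ _ => simp at hlen
  | cons bc bs ih =>
    intro u hb hlen hall
    cases u with
    | nil => simp at hlen
    | cons uc us =>
      simp only [List.zip_cons_cons, List.all_cons, Bool.and_eq_true] at hall
      have hbc : bc ≠ '*' := fun h => hb (h ▸ List.mem_cons_self)
      have h1 : uc = bc := by
        rcases Bool.or_eq_true_iff.mp hall.1 with h | h
        · exact absurd (by simpa using h) hbc
        · exact ((by simpa using h : bc = uc)).symm
      have h2 := ih us (fun h => hb (List.mem_cons_of_mem _ h)) (by simpa using hlen) hall.2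
      rw [h1, h2]

-- a star-free pattern matches exactly itself
theorem pv_nostar_match (b u : List Char) (hb : '*' ∉ b) :
    pvMatchB b u = (u == b) := by
  rw [Bool.eq_iff_iff, beq_iff_eq]
  constructor
  · intro h
    simp only [pvMatchB, Bool.and_eq_true, beq_iff_eq] at h
    exact pv_nostar_aux b u hb h.1 h.2
  · rintro rfl
    simp only [pvMatchB, beq_self_eq_true, Bool.true_and]
    exact pv_zip_self_all _

-- summing over a filtered list is summing an if-guarded term
theorem pv_sum_filter {α : Type} (c : List α) (q : α → Bool) (f : α → Int) :
    (c.map (fun u => if q u then f u else 0)).sum = ((c.filter q).map f).sum := by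
  induction c with
  | nil => simp
  | cons y c ih =>
    by_cases h : q y = true <;> simp [List.filter_cons, h, ih]

-- the frontier fold counts, level by level, what the DFS counts
theorem pv_frontier (ls : List (List String)) (parts : List (PySem.Set String)) :
    ((ls.foldl (fun parts c => parts.flatMap (fun p =>
        (c.filter (fun u => !p.contains u)).map (fun u => p.add u))) parts).length : Int)
      = (parts.map (fun p => pvCount ls p)).sum := by
  induction ls generalizing parts with
  | nil =>
    simp [pvCount]
  | cons c cs ih =>
    simp only [List.foldl_cons, ih]
    rw [List.map_flatMap, List.flatMap_def, List.sum_flatten, List.map_map]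
    refine congrArg List.sum (List.map_congr_left (fun p _ => ?_))
    simp only [Function.comp_apply]
    have hfun : (fun (t : Int) u => if p.contains u then t else t + pvCount cs (p.add u))
        = (fun t u => t + (if (!p.contains u) then pvCount cs (p.add u) else 0)) := by
      funext t u
      by_cases h : u ∈ p <;> simp [PySem.Set.contains, h]
    rw [show pvCount (c :: cs) p
        = c.foldl (fun t u => if p.contains u then t else t + pvCount cs (p.add u)) 0 from rfl,
      hfun, PySem.List.foldl_add, zero_add, pv_sum_filter]
    rw [List.map_map]
    rfl


-- step 1: A's sanction list is the filter-by-matcher list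
theorem pv_sanction_eq (user_id banned_id : List String) :
    banned_id.foldl (fun acc b_id =>
      acc ++ [user_id.foldl (fun tmp u_id =>
        if PySem.Str.len b_id == PySem.Str.len u_id then
          (if pvMatchA b_id.toList u_id.toList then tmp ++ [u_id] else tmp)
        else tmp) []]) []
      = banned_id.map (fun b => user_id.filter (fun u => pvMatchB b.toList u.toList)) := by
  rw [PySem.List.foldl_append_singleton_eq_map]
  refine congrArg _ (List.map_congr_left (fun b _ => ?_))
  have hf : (fun (tmp : List String) u_id =>
        if PySem.Str.len b == PySem.Str.len u_id then
          (if pvMatchA b.toList u_id.toList then tmp ++ [u_id] else tmp)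
        else tmp)
      = (fun tmp u => if pvMatchB b.toList u.toList then tmp ++ [u] else tmp) := by
    funext tmp u
    rw [← pv_match_eq]
    by_cases h1 : b.length = u.length
    · simp [PySem.Str.len_eq, h1]
    · simp [PySem.Str.len_eq, h1]
  rw [hf, PySem.List.foldl_append_if_eq_filter]
  simp

-- step 2: B's indexed candidate lists are the same filter-by-matcher lists
theorem pv_cand_eq (user_id banned_id : List String)
    (counts : PySem.Dict String Int) (byLen : PySem.Dict Int (List String))
    (hc : counts = user_id.foldl (fun d u => d.insert u (d.getD u 0 + 1)) PySem.Dict.empty)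
    (hb : byLen = user_id.foldl (fun d u =>
      d.insert (PySem.Str.len u) (d.getD (PySem.Str.len u) [] ++ [u])) PySem.Dict.empty) :
    banned_id.map (fun b =>
      if PySem.Str.isIn "*" b then
        (byLen.getD (PySem.Str.len b) []).filter (fun u =>
          (b.toList.zip u.toList).all (fun p => p.1 == '*' || p.1 == p.2))
      else PySem.List.pyRepeat [b] (counts.getD b 0))
    = banned_id.map (fun b => user_id.filter (fun u => pvMatchB b.toList u.toList)) := by
  refine List.map_congr_left (fun b _ => ?_)
  by_cases hstar : PySem.Str.isIn "*" b = true
  · rw [if_pos hstar, hb, pv_bylen]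
    have hempty : (PySem.Dict.empty : PySem.Dict Int (List String)).getD (PySem.Str.len b) [] = [] := by
      simp
    rw [hempty, List.nil_append, List.filter_filter]
    refine List.filter_congr (fun u _ => ?_)
    rw [Bool.eq_iff_iff]
    simp only [pvMatchB, PySem.Str.len_eq, Bool.and_eq_true, beq_iff_eq, Nat.cast_inj, String.length_toList]
    constructor
    · rintro ⟨hz, hl⟩
      exact ⟨hl.symm, hz⟩
    · rintro ⟨hl, hz⟩
      exact ⟨hz, hl.symm⟩
  · rw [if_neg hstar, hc, PySem.List.pyRepeat_singleton]
    have hnostar : '*' ∉ b.toList := by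
      have h1 : PySem.Str.isIn "*" b = false := by
        cases h : PySem.Str.isIn "*" b
        · rfl
        · exact absurd h hstar
      have h2 : ¬ ("*".toList <:+: b.toList) := by
        rw [← PySem.Chars.isIn_eq_false_iff]
        simpa [PySem.Str.isIn_eq] using h1
      intro hmem
      exact h2 (by simpa [List.singleton_infix_iff] using hmem)
    have hpred : (fun u : String => pvMatchB b.toList u.toList) = (fun u : String => u == b) := by
      funext u
      rw [pv_nostar_match _ _ hnostar, Bool.eq_iff_iff, beq_iff_eq, beq_iff_eq]
      exact ⟨fun h => String.toList_inj.mp h, fun h => h ▸ rfl⟩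
    rw [hpred, List.filter_beq, pv_dict_count]
    simp

-- step 3: A's product-and-filter count is the DFS count
theorem pv_counts_eq (user_id banned_id : List String) (cand : List (List String))
    (hcand : cand = banned_id.map (fun b => user_id.filter (fun u => pvMatchB b.toList u.toList))) :
    (pvProd cand).foldl (fun a x =>
       if (PySem.Set.ofList x).length ≠ banned_id.length then a - 1 else a)
      (((pvProd cand).length : Nat) : Int)
    = pvCount cand PySem.Set.empty := by
  rw [pv_foldl_sub (pvProd cand) (fun x => (PySem.Set.ofList x).length ≠ banned_id.length)]
  rw [pv_count_spec]
  have hlen := pv_countP_split (pvProd cand)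
      (fun x => decide ((PySem.Set.ofList x).length ≠ banned_id.length))
  have hcongr : (pvProd cand).countP
        (fun x => !(decide ((PySem.Set.ofList x).length ≠ banned_id.length)))
      = (pvProd cand).countP (pvQ PySem.Set.empty) := by
    refine List.countP_congr (fun x hx => ?_)
    have hxl : x.length = banned_id.length := by
      rw [pv_prod_length hx, hcand]; simp
    have h2 : pvQ PySem.Set.empty x = decide x.Nodup := by
      simp [pvQ, PySem.Set.empty, PySem.Set.contains]
    rw [h2, Bool.eq_iff_iff]
    simp [← hxl, pv_setlen_iff]
  rw [hlen, hcongr]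
  push_cast
  ring

-- step 4: B's frontier length is the DFS count
theorem pv_frontier_eq (cand : List (List String)) :
    ((cand.foldl (fun parts c => parts.flatMap (fun p =>
        (c.filter (fun u => !p.contains u)).map (fun u => p.add u)))
      [PySem.Set.empty]).length : Int)
      = pvCount cand PySem.Set.empty := by
  rw [pv_frontier]
  simp

-- step 5: A's dict-division pass is B's dedup-division pass
theorem pv_division_eq (banned_id : List String) (answer : Int) (d : PySem.Dict String Int)
    (hd : d = banned_id.foldl (fun d x => d.insert x (d.getD x 0 + 1)) PySem.Dict.empty) :
    d.keys.foldl (fun a x =>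
       if d.getD x 0 > 1 then PySem.Int.floordiv a (pvFact (d.getD x 0)) else a) answer
    = (PySem.List.dedup banned_id).foldl (fun a b =>
        let c : Int := (banned_id.count b : Int)
        if c > 1 then PySem.Int.floordiv a (pvFact c) else a) answer := by
  have hkeys : d.keys = PySem.List.dedup banned_id := by
    rw [hd, PySem.Dict.keys_foldl_insert]
    simp [PySem.Set.update, PySem.Set.ofList_eq_foldl]
  have hget : ∀ x, d.getD x 0 = (banned_id.count x : Int) := by
    intro x
    rw [hd, pv_dict_count]
    simp
  have hfun : (fun (a : Int) x =>
       if d.getD x 0 > 1 then PySem.Int.floordiv a (pvFact (d.getD x 0)) else a)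
      = (fun a b =>
        let c : Int := (banned_id.count b : Int)
        if c > 1 then PySem.Int.floordiv a (pvFact c) else a) := by
    funext a x
    rw [hget]
  rw [hkeys, hfun]

-- ===== VERDICT (by name: the statement is the Claim_ definition above) =====
theorem solution_spec : Claim_equal_solution := by
  intro user_id banned_id _
  show solution user_id banned_id = solution_alt user_id banned_id
  simp only [solution, solution_alt]
  rw [PySem.List.foldl_prod_mk
      (f := fun (d : PySem.Dict String Int) u => d.insert u (d.getD u 0 + 1))
      (g := fun (d : PySem.Dict Int (List String)) u =>
        d.insert (PySem.Str.len u) (d.getD (PySem.Str.len u) [] ++ [u]))]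
  rw [pv_sanction_eq, pv_cand_eq user_id banned_id _ _ rfl rfl]
  rw [pv_counts_eq user_id banned_id _ rfl]
  rw [pv_frontier_eq]
  rw [pv_division_eq banned_id _ _ rfl]
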